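-- pv_equiv track=rewrite | github.com/Akheel51/DSA-In-Python | Replace all 0's with 5 - GFG/replace-all-0s-with-5.py | convertFive
-- ===== SOURCE A (Python) =====
-- def convertFive(n):
--     s=str(n)
--     res=""
--     for i in s:
--         if i=="0":
--             res+="5"
--         else:
--             res+=i
--     return int(res)
-- ===== SOURCE B (Python) =====
-- def convertFive(n):
--     if n == 0:
--         return 5
--     sign = -1 if n < 0 else 1
--     m = -n if n < 0 else n
--     result = 0
--     place = 1
--     while m > 0:
--         d = m % 10
--         result += (5 if d == 0 else d) * place
--         place *= 10
--         m //= 10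
--     return sign * result
-- ===== Notes on version B (the rewrite author's own statement) =====
-- stated objective: alternative
-- what changed: Replaces string conversion, per-character replacement and re-parsing with a pure arithmetic digit loop (n%10 / n//10 with a place accumulator, sign handled separately).
import Mathlib
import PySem

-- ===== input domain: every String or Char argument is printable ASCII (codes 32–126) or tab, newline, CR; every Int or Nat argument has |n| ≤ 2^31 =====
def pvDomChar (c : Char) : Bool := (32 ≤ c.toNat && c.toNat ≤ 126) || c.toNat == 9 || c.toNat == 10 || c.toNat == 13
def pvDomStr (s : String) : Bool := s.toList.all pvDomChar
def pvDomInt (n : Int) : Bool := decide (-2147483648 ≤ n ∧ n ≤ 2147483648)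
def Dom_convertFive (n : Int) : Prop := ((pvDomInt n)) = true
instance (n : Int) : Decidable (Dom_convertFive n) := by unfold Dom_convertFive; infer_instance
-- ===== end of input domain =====

-- B replaces A's str(n) / per-character replacement / int(res) round-trip by a pure arithmetic digit loop (alternative decomposition, same cost).

-- ===== PORT A =====
-- str(n) and int(s) are ported exactly via PySem.Int.toChars / PySem.Int.ofChars? at the List Char level;
-- int(res) never raises here (res is always a valid integer literal), so the .getD 0 default is unreachable.
def convertFive (n : Int) : Int :=
  let s := PySem.Int.toChars n
  let res := s.foldl (fun res c => if c = '0' then res ++ ['5'] else res ++ [c]) ([] : List Char)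
  (PySem.Int.ofChars? res).getD 0

-- ===== PORT B =====
-- the while-loop of Source B, over (m, place, result)
def altLoop (m place result : Nat) : Nat :=
  if _h : m = 0 then result
  else altLoop (m / 10) (place * 10) (result + (if m % 10 = 0 then 5 else m % 10) * place)
termination_by m
decreasing_by exact Nat.div_lt_self (Nat.pos_of_ne_zero _h) (by norm_num)

def convertFive_alt (n : Int) : Int :=
  if n = 0 then 5
  else (if n < 0 then (-1 : Int) else 1) * (altLoop n.natAbs 1 0 : Int)

-- ===== PRECONDITION & SPEC =====
def Spec_convertFive (n : Int) (out : Int) : Prop := out = convertFive_alt n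
instance (n : Int) (out : Int) : Decidable (Spec_convertFive n out) := by unfold Spec_convertFive; infer_instance

-- ===== CLAIM (what is proved, stated in full; the proofs are below) =====
def Claim_equal_convertFive : Prop := ∀ (n : Int), Dom_convertFive n → Spec_convertFive n (convertFive n)

-- ===== LEMMAS AND PROOFS =====

-- the digit-replacement map of A, at character level
def repC (c : Char) : Char := if c = '0' then '5' else c

-- replica of the digit-run parser inside PySem.Int.ofChars?; agrees with it definitionally
-- on lists with a concrete spine (which is how it is used below, via `exact` on cased lists)
def myGo : List Char → Bool → Nat → Option Nat
  | [], afterDigit, acc => if afterDigit = true then some acc else none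
  | c :: rest, afterDigit, acc =>
      if c.isDigit = true then myGo rest true (acc * 10 + (c.toNat - '0'.toNat))
      else
        if c = '_' ∧ afterDigit = true then
          match rest with
          | _d :: _tail => if _d.isDigit = true then myGo rest false acc else none
          | [] => none
        else none

-- the intended value on a positive number: decimal digits with 0 replaced by 5
def repF (m : Nat) : Nat :=
  if _h : m = 0 then 0
  else repF (m / 10) * 10 + (if m % 10 = 0 then 5 else m % 10)
termination_by m
decreasing_by exact Nat.div_lt_self (Nat.pos_of_ne_zero _h) (by norm_num)

lemma repF_zero : repF 0 = 0 := by rw [repF]; simp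

lemma repF_step (m : Nat) (h : m ≠ 0) :
    repF m = repF (m / 10) * 10 + (if m % 10 = 0 then 5 else m % 10) := by
  conv_lhs => rw [repF]
  rw [dif_neg h]

lemma altLoop_zero (p r : Nat) : altLoop 0 p r = r := by rw [altLoop]; simp

lemma altLoop_step (m p r : Nat) (h : m ≠ 0) :
    altLoop m p r = altLoop (m / 10) (p * 10) (r + (if m % 10 = 0 then 5 else m % 10) * p) := by
  conv_lhs => rw [altLoop]
  rw [dif_neg h]

lemma altLoop_eq (m : Nat) : ∀ p r : Nat, altLoop m p r = r + repF m * p := by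
  induction m using Nat.strong_induction_on with
  | _ m ih =>
    intro p r
    by_cases h : m = 0
    · subst h; rw [altLoop_zero, repF_zero]; ring
    · rw [altLoop_step m p r h, ih (m / 10) (Nat.div_lt_self (Nat.pos_of_ne_zero h) (by norm_num)),
        repF_step m h]
      ring

lemma repC_digitChar (d : Nat) (hd : d < 10) :
    (repC d.digitChar).toNat - '0'.toNat = if d = 0 then 5 else d := by
  interval_cases d <;> decide

lemma repC_isDigit (c : Char) (h : c.isDigit = true) : (repC c).isDigit = true := by
  by_cases h0 : c = '0'
  · subst h0; decide
  · simpa [repC, h0] using h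

lemma isIntSpace_of_isDigit (c : Char) (h : c.isDigit = true) :
    PySem.Int.isIntSpace c = false := by
  cases hx : PySem.Int.isIntSpace c
  · rfl
  · exfalso
    simp only [PySem.Int.isIntSpace, Bool.or_eq_true, decide_eq_true_eq] at hx
    rcases hx with ((((hx|hx)|hx)|hx)|hx)|hx <;> subst hx <;> simp at h

lemma dropWhile_nospace (l : List Char) (h : ∀ c ∈ l, PySem.Int.isIntSpace c = false) :
    l.dropWhile PySem.Int.isIntSpace = l := by
  cases l with
  | nil => rfl
  | cons c rest => simp [List.dropWhile, h c (by simp)]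

lemma cleanup_id (l : List Char) (h : ∀ c ∈ l, PySem.Int.isIntSpace c = false) :
    ((l.dropWhile PySem.Int.isIntSpace).reverse.dropWhile PySem.Int.isIntSpace).reverse = l := by
  rw [dropWhile_nospace l h,
    dropWhile_nospace l.reverse (by intro c hc; exact h c (by simpa using hc)),
    List.reverse_reverse]

lemma myGo_cons_digit (c : Char) (rest : List Char) (b : Bool) (acc : Nat)
    (hc : c.isDigit = true) :
    myGo (c :: rest) b acc = myGo rest true (acc * 10 + (c.toNat - '0'.toNat)) := by
  cases rest <;> simp [myGo, hc]

lemma myGo_digits (ds : List Char) : ∀ acc : Nat, (∀ c ∈ ds, c.isDigit = true) →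
    myGo ds true acc = some (ds.foldl (fun a c => a * 10 + (c.toNat - '0'.toNat)) acc) := by
  induction ds with
  | nil => intro acc _; rfl
  | cons c rest ih =>
    intro acc h
    rw [myGo_cons_digit c rest true acc (h c (by simp))]
    exact ih _ (fun x hx => h x (by simp [hx]))

lemma goLeaf (F : Int → Int) (l : List Char) (hne : l ≠ []) (h : ∀ c ∈ l, c.isDigit = true) :
    Option.map F ((myGo l false 0).bind fun a => some ((a : Nat) : Int)) =
      some (F ((l.foldl (fun a c => a * 10 + (c.toNat - '0'.toNat)) 0 : Nat) : Int)) := by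
  cases l with
  | nil => exact absurd rfl hne
  | cons c ds =>
    rw [myGo_cons_digit c ds false 0 (h c (by simp)),
      myGo_digits ds _ (fun x hx => h x (by simp [hx]))]
    rfl

set_option maxHeartbeats 4000000 in
lemma ofChars?_digits (l : List Char) (hlen : l.length ≤ 10) (hne : l ≠ [])
    (h : ∀ c ∈ l, c.isDigit = true) :
    PySem.Int.ofChars? l =
      some ((l.foldl (fun a c => a * 10 + (c.toNat - '0'.toNat)) 0 : Nat) : Int) := by
  simp only [PySem.Int.ofChars?]
  rw [cleanup_id l (fun c hc => isIntSpace_of_isDigit c (h c hc))]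
  split
  · exact absurd (h '-' (by simp)) (by decide)
  · exact absurd (h '+' (by simp)) (by decide)
  · rcases l with _ | ⟨a0, _ | ⟨a1, _ | ⟨a2, _ | ⟨a3, _ | ⟨a4, _ | ⟨a5, _ | ⟨a6, _ | ⟨a7, _ | ⟨a8, _ | ⟨a9, _ | ⟨a10, rest⟩⟩⟩⟩⟩⟩⟩⟩⟩⟩⟩
    all_goals first
      | exact absurd rfl hne
      | exact goLeaf (fun n => n) _ (by simp) h
      | (simp at hlen; omega)

set_option maxHeartbeats 4000000 in
lemma ofChars?_neg_digits (l : List Char) (hlen : l.length ≤ 10) (hne : l ≠ [])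
    (h : ∀ c ∈ l, c.isDigit = true) :
    PySem.Int.ofChars? ('-' :: l) =
      some (-((l.foldl (fun a c => a * 10 + (c.toNat - '0'.toNat)) 0 : Nat) : Int)) := by
  simp only [PySem.Int.ofChars?]
  rw [cleanup_id ('-' :: l) (by
    intro c hc
    rcases List.mem_cons.mp hc with h1 | h2
    · subst h1; decide
    · exact isIntSpace_of_isDigit c (h c h2))]
  split
  · rename_i ds' heq
    injection heq with _ h2
    subst h2
    rcases l with _ | ⟨a0, _ | ⟨a1, _ | ⟨a2, _ | ⟨a3, _ | ⟨a4, _ | ⟨a5, _ | ⟨a6, _ | ⟨a7, _ | ⟨a8, _ | ⟨a9, _ | ⟨a10, rest⟩⟩⟩⟩⟩⟩⟩⟩⟩⟩⟩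
    all_goals first
      | exact absurd rfl hne
      | exact goLeaf (fun n => -n) _ (by simp) h
      | (simp at hlen; omega)
  · rename_i ds' heq
    injection heq with h1 _
    exact absurd h1 (by decide)
  · rename_i hminus _
    exact absurd rfl (hminus l)

lemma foldl_rep (s : List Char) :
    s.foldl (fun res c => if c = '0' then res ++ ['5'] else res ++ [c]) ([] : List Char) =
      s.map repC := by
  have hfun : (fun (res : List Char) (c : Char) => if c = '0' then res ++ ['5'] else res ++ [c]) =
      fun res c => res ++ [repC c] := by
    funext res c
    by_cases h : c = '0' <;> simp [repC, h]
  rw [hfun]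
  simpa using PySem.List.foldl_append_singleton_eq_map repC s []

lemma map_rep_digits (m : Nat) : ∀ c ∈ (Nat.toDigits 10 m).map repC, c.isDigit = true := by
  intro c hc
  rcases List.mem_map.mp hc with ⟨d, hd, rfl⟩
  exact repC_isDigit d (Nat.isDigit_of_mem_toDigits (by norm_num) (by norm_num) hd)

lemma map_rep_ne_nil (m : Nat) : (Nat.toDigits 10 m).map repC ≠ [] := by
  have := Nat.length_toDigits_pos (b := 10) (n := m)
  intro h
  rw [← List.length_eq_zero_iff, List.length_map] at h
  omega

lemma map_rep_len (m : Nat) (hm : m ≤ 2147483648) :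
    ((Nat.toDigits 10 m).map repC).length ≤ 10 := by
  rw [List.length_map]
  exact (Nat.length_toDigits_le_iff (by norm_num) (by norm_num)).mpr (by omega)

lemma foldl_map_rep_toDigits (m : Nat) (hm : 0 < m) :
    ((Nat.toDigits 10 m).map repC).foldl (fun a c => a * 10 + (c.toNat - '0'.toNat)) 0 =
      repF m := by
  induction m using Nat.strong_induction_on with
  | _ m ih =>
    by_cases hlt : m < 10
    · rw [Nat.toDigits_of_lt_base hlt]
      simp only [List.map_cons, List.map_nil, List.foldl_cons, List.foldl_nil]
      rw [repC_digitChar m hlt, repF_step m (by omega)]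
      rw [Nat.div_eq_of_lt hlt, repF_zero, Nat.mod_eq_of_lt hlt]
    · rw [Nat.toDigits_eq_if (by norm_num : (1:Nat) < 10), if_neg (by omega)]
      rw [List.map_append, List.foldl_append]
      rw [ih (m / 10) (Nat.div_lt_self hm (by norm_num)) (by omega)]
      simp only [List.map_cons, List.map_nil, List.foldl_cons, List.foldl_nil]
      rw [repC_digitChar (m % 10) (Nat.mod_lt _ (by norm_num))]
      rw [repF_step m (by omega)]

-- ===== VERDICT (by name: the statement is the Claim_ definition above) =====
theorem convertFive_spec : Claim_equal_convertFive := by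
  intro n hdom
  have hbound : n.natAbs ≤ 2147483648 := by
    simp only [Dom_convertFive, pvDomInt, decide_eq_true_eq] at hdom
    omega
  unfold Spec_convertFive
  rcases lt_trichotomy n 0 with hneg | hz | hpos
  · -- n < 0
    have hA : PySem.Int.toChars n = '-' :: Nat.toDigits 10 n.natAbs := by
      simp [PySem.Int.toChars, hneg]
    rw [convertFive, hA]
    simp only [foldl_rep, List.map_cons]
    rw [show repC '-' = '-' from by decide]
    rw [ofChars?_neg_digits _ (map_rep_len n.natAbs hbound) (map_rep_ne_nil n.natAbs)
      (map_rep_digits n.natAbs)]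
    rw [foldl_map_rep_toDigits n.natAbs (by omega)]
    rw [convertFive_alt, if_neg (by omega), if_pos hneg, altLoop_eq]
    simp
  · -- n = 0
    subst hz; decide
  · -- n > 0
    have hA : PySem.Int.toChars n = Nat.toDigits 10 n.toNat := by
      simp [PySem.Int.toChars, not_lt.mpr (le_of_lt hpos)]
    rw [convertFive, hA]
    simp only [foldl_rep]
    rw [show n.toNat = n.natAbs from by omega]
    rw [ofChars?_digits _ (map_rep_len n.natAbs hbound) (map_rep_ne_nil n.natAbs)
      (map_rep_digits n.natAbs)]
    rw [foldl_map_rep_toDigits n.natAbs (by omega)]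
    rw [convertFive_alt, if_neg (by omega), if_neg (by omega), altLoop_eq]
    simp
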